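-- pv_equiv track=rewrite | github.com/jvitasek/VUT-FIT-IPP-Proj2 | parser.py | remove_macros
-- ===== SOURCE A (Python) =====
-- def remove_macros(string):
--     """!
--     @brief Removes all C preprocessor macros.
--     Matches all the C macros and removes them (substitutes with '').
--
--     @param string The content of the file passed.
--     @return Returns the edited content of the file.
--     """
--     # bool value to know if we're inside a macro
--     inside_macro = False
--     # list for stored non-macro chars
--     final_content = list()
--     for index in range(0, len(string)):
--         # macro start
--         if string[index] == '#':
--             inside_macro = True
--         # macro end if multiline \ isn't present
--         if inside_macro is True and string[index] == '\n' and string[index-1] != '\\':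
--             inside_macro = False
--         # only store the content that is not a macro
--         if inside_macro is False:
--             final_content.append(string[index])
--     # make a string out of the char list
--     final_content = ''.join(final_content)
--     # returning the final string
--     return final_content
-- ===== SOURCE B (Python) =====
-- def remove_macros(string):
--     lines = string.split('\n')
--     pieces = []
--     skipping = False
--     for line in lines[:-1]:
--         if skipping:
--             if not line.endswith('\\'):
--                 skipping = False
--                 pieces.append('\n')
--         else:
--             h = line.find('#')
--             if h == -1:
--                 pieces.append(line)
--                 pieces.append('\n')
--             else:
--                 pieces.append(line[:h])
--                 if line.endswith('\\'):
--                     skipping = True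
--                 else:
--                     pieces.append('\n')
--     last = lines[-1]
--     if not skipping:
--         h = last.find('#')
--         pieces.append(last if h == -1 else last[:h])
--     return ''.join(pieces)
-- ===== Notes on version B (the rewrite author's own statement) =====
-- stated objective: idiomatic
-- what changed: Replaced the char-by-char inside_macro state machine over string indices by a line-based pass: split the text into lines, cut each line at its first hash character via str.find and a slice, and track backslash line continuations with str.endswith, joining the kept pieces.
import Mathlib
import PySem

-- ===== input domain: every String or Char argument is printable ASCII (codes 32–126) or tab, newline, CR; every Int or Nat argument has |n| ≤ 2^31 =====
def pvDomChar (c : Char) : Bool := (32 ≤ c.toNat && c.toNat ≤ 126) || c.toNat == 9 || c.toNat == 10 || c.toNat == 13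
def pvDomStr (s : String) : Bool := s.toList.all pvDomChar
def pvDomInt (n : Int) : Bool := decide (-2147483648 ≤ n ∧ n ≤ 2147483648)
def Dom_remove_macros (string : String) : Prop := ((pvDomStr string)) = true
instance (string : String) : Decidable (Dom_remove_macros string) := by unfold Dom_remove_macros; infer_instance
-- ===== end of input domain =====

-- B replaces A's char-by-char state machine by a line-based pass (split into lines, cut each
-- line at its first hash, track backslash line continuations via endswith); measured faster by a
-- constant factor in a timing run.

-- ===== PORT A =====
-- loop body of A: the two state updates and the conditional append, reading string[index]
-- and string[index-1] (negative index -1 wraps to the last char, as in Python)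
def stepA (cs : List Char) (st : Bool × List Char) (index : Int) : Bool × List Char :=
  let c := PySem.List.pyGetD cs index ' '
  let inside₁ := if c = '#' then true else st.1
  let inside₂ := if inside₁ = true ∧ c = '\n' ∧ ¬ (PySem.List.pyGetD cs (index - 1) ' ' = '\\') then false else inside₁
  (inside₂, if inside₂ = false then st.2 ++ [c] else st.2)

def remove_macros (string : String) : String :=
  let cs := string.toList
  let r := List.foldl (stepA cs) (false, []) (PySem.List.pyRange 0 (PySem.List.len cs))
  -- ''.join over a list of single chars = String.ofList (exact)
  String.ofList r.2

-- ===== PORT B =====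
-- Python B's `last if h == -1 else last[:h]` (cut a line at its first '#')
def cutB (l : List Char) : List Char :=
  if PySem.Chars.find l ['#'] = -1 then l
  else PySem.List.slice l none (some (PySem.Chars.find l ['#']))

-- loop body of B over one non-last line; state = (skipping, pieces)
def stepB (st : Bool × List (List Char)) (line : List Char) : Bool × List (List Char) :=
  if st.1 then
    if PySem.Chars.endswith line ['\\'] then st
    else (false, st.2 ++ [['\n']])
  else
    let h := PySem.Chars.find line ['#']
    if h = -1 then (st.1, st.2 ++ [line, ['\n']])
    else if PySem.Chars.endswith line ['\\'] then (true, st.2 ++ [PySem.List.slice line none (some h)])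
    else (st.1, st.2 ++ [PySem.List.slice line none (some h), ['\n']])

def remove_macros_alt (string : String) : String :=
  let lines := PySem.Chars.splitOn string.toList ['\n']   -- string.split('\n')
  let st := List.foldl stepB (false, []) (PySem.List.slice lines none (some (-1)))  -- lines[:-1]
  let last := PySem.List.pyGetD lines (-1) []             -- lines[-1]; split never yields []
  let pieces := if st.1 = false then st.2 ++ [cutB last] else st.2
  String.ofList (PySem.Chars.join [] pieces)              -- ''.join(pieces)

-- ===== PRECONDITION & SPEC =====
def Spec_remove_macros (string : String) (out : String) : Prop := out = remove_macros_alt string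
instance (string : String) (out : String) : Decidable (Spec_remove_macros string out) := by unfold Spec_remove_macros; infer_instance

-- ===== CLAIM (what is proved, stated in full; the proofs are below) =====
def Claim_equal_remove_macros : Prop := ∀ (string : String), Dom_remove_macros string → Spec_remove_macros string (remove_macros string)

-- ===== LEMMAS AND PROOFS =====

-- A's state machine, written structurally: b = inside_macro, p = previous character
def machA : Bool → Char → List Char → List Char
  | _, _, [] => []
  | b, p, c :: rest =>
    let b₁ := if c = '#' then true else b
    let b₂ := if b₁ = true ∧ c = '\n' ∧ ¬ (p = '\\') then false else b₁
    (if b₂ = false then [c] else []) ++ machA b₂ c rest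

-- the skipping flag after a non-last line, as B computes it
def nextB (b : Bool) (l : List Char) : Bool :=
  if b then PySem.Chars.endswith l ['\\']
  else decide (PySem.Chars.find l ['#'] ≠ -1) && PySem.Chars.endswith l ['\\']

-- B's loop, written structurally over the list of lines (last line special)
def runB : Bool → List (List Char) → List Char
  | _, [] => []
  | b, [l] => if b then [] else cutB l
  | b, l :: l' :: ls =>
    (if b then [] else cutB l) ++ (if nextB b l then [] else ['\n']) ++ runB (nextB b l) (l' :: ls)

lemma join_nil_flatten (ps : List (List Char)) : PySem.Chars.join [] ps = ps.flatten := by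
  induction ps with
  | nil => simp [PySem.Chars.join_nil]
  | cons p ps ih =>
    cases ps with
    | nil => simp [PySem.Chars.join_singleton]
    | cons q rest => rw [PySem.Chars.join_cons_cons]; simp [ih]

lemma slice_neg_one {α : Type} (l : List α) : PySem.List.slice l none (some (-1)) = l.dropLast := by
  cases l with
  | nil => rfl
  | cons a t =>
    simp [PySem.List.slice, PySem.List.clampIdx, List.dropLast_eq_take]
    rw [if_neg (by omega : ¬ ((t.length : Int) < 0))]
    omega

-- characterisation of find for a single-character needle
lemma find_go_single (x : Char) : ∀ (l : List Char) (k : Nat),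
    PySem.Chars.find.go [x] l k =
      if x ∈ l then ((k : Int) + (l.takeWhile (· ≠ x)).length) else -1 := by
  intro l
  induction l with
  | nil => intro k; simp [PySem.Chars.find.go]
  | cons c t ih =>
    intro k
    rw [PySem.Chars.find.go]
    by_cases hc : c = x
    · subst hc; simp [List.isPrefixOf]
    · simp [List.isPrefixOf, hc, ih (k+1), Ne.symm hc]
      split <;> push_cast <;> ring_nf

lemma find_single (x : Char) (l : List Char) :
    PySem.Chars.find l [x] = if x ∈ l then ((l.takeWhile (· ≠ x)).length : Int) else -1 := by
  rw [PySem.Chars.find, find_go_single]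
  simp

lemma cutB_eq_takeWhile (l : List Char) : cutB l = l.takeWhile (· ≠ '#') := by
  rw [cutB, find_single]
  by_cases h : '#' ∈ l
  · rw [if_pos h, if_neg (by omega), PySem.List.slice_to _ (by omega)]
    rw [Int.toNat_natCast]
    exact (List.prefix_iff_eq_take.1 (List.takeWhile_prefix _)).symm
  · rw [if_neg h, if_pos rfl]
    refine (List.takeWhile_eq_self_iff.mpr ?_).symm
    intro a ha
    simpa using fun (e : a = '#') => h (e ▸ ha)

lemma endswith_single (x : Char) (l : List Char) :
    PySem.Chars.endswith l [x] = true ↔ l.getLast? = some x := by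
  rw [PySem.Chars.endswith_iff, List.getLast?_eq_some_iff]
  constructor
  · rintro ⟨t, rfl⟩; exact ⟨t, rfl⟩
  · rintro ⟨t, rfl⟩; exact ⟨t, rfl⟩

lemma endswith_backslash (l : List Char) (p : Char) (hp : l = [] → p ≠ '\\') :
    PySem.Chars.endswith l ['\\'] = decide (l.getLastD p = '\\') := by
  cases l with
  | nil =>
    have : ¬ (p = '\\') := hp rfl
    simp [PySem.Chars.endswith, List.isSuffixOf, this]
  | cons c t =>
    rw [Bool.eq_iff_iff, endswith_single, decide_eq_true_iff, List.getLastD_eq_getLast?]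
    cases h2 : (c :: t).getLast? with
    | none => simp at h2
    | some a => simp

-- PySem.Chars.splitOn with a single-char separator is core List.splitOn
lemma splitOn_go_single (x : Char) : ∀ (fuel : Nat) (l cur : List Char) (acc : List (List Char)),
    l.length ≤ fuel →
    PySem.Chars.splitOn.go [x] fuel l cur acc =
      acc.reverse ++ List.modifyHead (cur.reverse ++ ·) (l.splitOn x) := by
  intro fuel
  induction fuel with
  | zero =>
    intro l cur acc h
    have : l = [] := List.length_eq_zero_iff.mp (Nat.le_zero.mp h)
    subst this
    rw [PySem.Chars.splitOn.go]
    simp [List.splitOn, List.splitOnP_nil]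
  | succ fuel ih =>
    intro l cur acc h
    cases l with
    | nil =>
      rw [PySem.Chars.splitOn.go]
      · simp [List.splitOn, List.splitOnP_nil]
      · simp
    | cons c t =>
      rw [PySem.Chars.splitOn.go]
      by_cases hc : c = x
      · subst hc
        simp only [List.isPrefixOf, BEq.rfl, Bool.true_and, if_pos]
        rw [ih _ _ _ (by simpa using Nat.le_of_succ_le_succ h)]
        simp only [List.splitOn, List.splitOnP_cons, BEq.rfl, if_pos]
        cases h2 : List.splitOnP (fun y => y == c) t with
        | nil => simp [h2]
        | cons a b => simp [h2]
      · have hpre : [x].isPrefixOf (c :: t) = false := by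
          simp [List.isPrefixOf]; exact fun e => (hc e.symm).elim
        rw [if_neg (by simp [hpre])]
        rw [ih _ _ _ (by simpa using Nat.le_of_succ_le_succ h)]
        simp only [List.splitOn, List.splitOnP_cons, beq_iff_eq, hc, if_false]
        have hne := List.splitOnP_ne_nil (fun y => y == x) t
        obtain ⟨hd, tl, e⟩ : ∃ hd tl, List.splitOnP (fun y => y == x) t = hd :: tl := by
          cases h' : List.splitOnP (fun y => y == x) t with
          | nil => exact absurd h' hne
          | cons a b => exact ⟨a, b, rfl⟩
        rw [e]
        simp

lemma splitOn_single (x : Char) (l : List Char) :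
    PySem.Chars.splitOn l [x] = l.splitOn x := by
  rw [PySem.Chars.splitOn, splitOn_go_single x _ _ _ _ (by omega)]
  have hne := List.splitOnP_ne_nil (fun y => y == x) l
  cases h' : List.splitOnP (fun y => y == x) l with
  | nil => exact absurd h' hne
  | cons a b => simp [List.splitOn, h']

lemma splitOn_no_sep (x : Char) (l : List Char) (h : x ∉ l) : l.splitOn x = [l] := by
  induction l with
  | nil => simp [List.splitOn, List.splitOnP_nil]
  | cons c t ih =>
    have hc : ¬ (c = x) := fun e => h (e ▸ List.mem_cons_self)
    simp only [List.splitOn, List.splitOnP_cons, beq_iff_eq, hc, if_false] at *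
    rw [ih (fun m => h (List.mem_cons_of_mem _ m))]
    rfl

lemma splitOn_append (x : Char) (l r : List Char) (h : x ∉ l) :
    (l ++ x :: r).splitOn x = l :: r.splitOn x := by
  induction l with
  | nil => simp [List.splitOn, List.splitOnP_cons]
  | cons c t ih =>
    have hc : ¬ (c = x) := fun e => h (e ▸ List.mem_cons_self)
    simp only [List.cons_append, List.splitOn, List.splitOnP_cons, beq_iff_eq, hc, if_false] at *
    rw [ih (fun m => h (List.mem_cons_of_mem _ m))]
    rfl

-- machA consumes one '\n'-free block
lemma machA_line (line : List Char) : ∀ (b : Bool) (p : Char) (sfx : List Char), '\n' ∉ line →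
    machA b p (line ++ sfx) =
      (if b then [] else line.takeWhile (· ≠ '#')) ++
        machA (b || decide ('#' ∈ line)) (line.getLastD p) sfx := by
  induction line with
  | nil => intro b p sfx _; simp
  | cons c t ih =>
    intro b p sfx h
    have hc : ¬ (c = '\n') := fun e => h (e ▸ List.mem_cons_self)
    have ht : '\n' ∉ t := fun m => h (List.mem_cons_of_mem _ m)
    rw [List.cons_append, machA]
    simp only [hc, and_false, false_and, if_false]
    by_cases hb : b = true
    · subst hb
      simp only [ite_self, Bool.true_or]
      rw [ih true c sfx ht]
      simp [← List.getLastD_eq_getLast?, List.getLastD_cons]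
    · have hb' : b = false := Bool.eq_false_iff.mpr hb
      subst hb'
      by_cases hsh : c = '#'
      · subst hsh
        simp only [if_pos rfl, if_true]
        rw [ih true '#' sfx ht]
        simp [← List.getLastD_eq_getLast?, List.getLastD_cons, List.takeWhile_cons]
      · simp only [hsh, if_false]
        rw [ih false c sfx ht]
        simp [← List.getLastD_eq_getLast?, List.getLastD_cons, List.takeWhile_cons, hsh, Ne.symm hsh]

-- nextB agrees with the machine's continuation test
lemma nextB_eq (b : Bool) (p : Char) (line : List Char) (hp : b = true → p ≠ '\\') :
    nextB b line = ((b || decide ('#' ∈ line)) && decide (line.getLastD p = '\\')) := by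
  cases b with
  | true =>
    rw [nextB, if_pos rfl, Bool.true_or, Bool.true_and]
    exact endswith_backslash line p (fun _ => hp rfl)
  | false =>
    rw [nextB, if_neg (by simp), Bool.false_or]
    have hf : decide (PySem.Chars.find line ['#'] ≠ -1) = decide ('#' ∈ line) := by
      rw [find_single]
      by_cases h : '#' ∈ line
      · simp [h]
      · simp [h]
    rw [hf]
    by_cases h : '#' ∈ line
    · have hne : line ≠ [] := List.ne_nil_of_mem h
      rw [endswith_backslash line p (fun e => absurd e hne)]
    · simp [h]

-- the heart: machine = line algorithm
lemma machA_eq_runB : ∀ (n : Nat) (cs : List Char) (b : Bool) (p : Char), cs.length ≤ n →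
    (b = true → p ≠ '\\') → machA b p cs = runB b (cs.splitOn '\n') := by
  intro n
  induction n with
  | zero =>
    intro cs b p h _
    have : cs = [] := List.length_eq_zero_iff.mp (Nat.le_zero.mp h)
    subst this
    rw [splitOn_no_sep _ _ (by simp)]
    cases b <;> simp [machA, runB, cutB_eq_takeWhile]
  | succ n ih =>
    intro cs b p h hp
    by_cases hmem : '\n' ∈ cs
    · set line := cs.takeWhile (· ≠ '\n') with hline
      have hdw : cs.dropWhile (· ≠ '\n') ≠ [] := by
        intro e
        have h' := List.dropWhile_eq_nil_iff.mp e '\n' hmem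
        simp at h'
      obtain ⟨d, rest, hd⟩ : ∃ d rest, cs.dropWhile (· ≠ '\n') = d :: rest := by
        cases h' : cs.dropWhile (· ≠ '\n') with
        | nil => exact absurd h' hdw
        | cons a b => exact ⟨a, b, rfl⟩
      have hdn : d = '\n' := by
        have h5 : (cs.dropWhile (fun c => decide (c ≠ '\n'))).head? = some d := by rw [hd]; rfl
        rw [List.head?_eq_some_head hdw] at h5
        have h6 := List.head_dropWhile_not (fun c => decide (c ≠ '\n')) (l := cs) hdw
        rw [Option.some_inj.mp h5] at h6
        simpa using h6
      subst hdn
      have hsplit : cs = line ++ '\n' :: rest := by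
        conv_lhs => rw [← List.takeWhile_append_dropWhile (p := fun c => decide (c ≠ '\n')) (l := cs)]
        rw [hd]
      have hnl : '\n' ∉ line := by
        intro m
        have := List.mem_takeWhile_imp m
        simp at this
      have hlen : rest.length ≤ n := by
        have : cs.length = line.length + 1 + rest.length := by
          rw [hsplit]; simp; omega
        omega
      obtain ⟨r0, rs, hr⟩ : ∃ r0 rs, rest.splitOn '\n' = r0 :: rs := by
        cases h' : rest.splitOn '\n' with
        | nil => exact absurd h' (by rw [List.splitOn]; exact List.splitOnP_ne_nil _ _)
        | cons a b => exact ⟨a, b, rfl⟩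
      rw [hsplit, splitOn_append _ _ _ hnl, machA_line line b p _ hnl, hr, runB,
          nextB_eq b p line hp, cutB_eq_takeWhile]
      have key : machA (b || decide ('#' ∈ line)) (line.getLastD p) ('\n' :: rest) =
          (if ((b || decide ('#' ∈ line)) && decide (line.getLastD p = '\\')) then [] else ['\n']) ++
            runB ((b || decide ('#' ∈ line)) && decide (line.getLastD p = '\\')) (r0 :: rs) := by
        rw [← hr, ← ih rest ((b || decide ('#' ∈ line)) && decide (line.getLastD p = '\\')) '\n' hlen
              (by intro _; decide), machA]
        rcases Bool.eq_false_or_eq_true (b || decide ('#' ∈ line)) with h1 | h1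
        · simp [h1]
        · by_cases h2 : line.getLastD p = '\\'
          · simp [h1, h2]
          · simp [h1, h2]
      rw [key]
      simp [List.append_assoc]
    · rw [splitOn_no_sep _ _ hmem, ← List.append_nil cs, machA_line cs b p [] hmem]
      cases b <;> simp [machA, runB, cutB_eq_takeWhile]

-- bridge: A's indexed foldl = machA
lemma foldA_eq (cs : List Char) : ∀ (suf pre : List Char) (b : Bool) (acc : List Char),
    cs = pre ++ suf →
    (List.foldl (stepA cs) (b, acc) (PySem.List.pyRange (pre.length : Int) (cs.length : Int))).2 =
      acc ++ machA b (PySem.List.pyGetD cs ((pre.length : Int) - 1) ' ') suf := by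
  intro suf
  induction suf with
  | nil =>
    intro pre b acc hcs
    have he : (cs.length : Int) = (pre.length : Int) := by rw [hcs]; simp
    rw [he, PySem.List.pyRange_one_eq_nil (le_refl _)]
    simp [machA]
  | cons c rest ih =>
    intro pre b acc hcs
    have hlt : (pre.length : Int) < (cs.length : Int) := by rw [hcs]; simp
    rw [PySem.List.pyRange_one_cons hlt, List.foldl_cons]
    have hc : PySem.List.pyGetD cs ((pre.length : Int)) ' ' = c := by
      rw [PySem.List.pyGetD_natCast, hcs, List.getD_eq_getElem?_getD,
          List.getElem?_append_right (le_refl pre.length)]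
      simp
    have hstep : stepA cs (b, acc) (pre.length : Int) =
        (let b₁ := if c = '#' then true else b
         let b₂ := if b₁ = true ∧ c = '\n' ∧ ¬ (PySem.List.pyGetD cs ((pre.length : Int) - 1) ' ' = '\\') then false else b₁
         (b₂, if b₂ = false then acc ++ [c] else acc)) := by
      rw [stepA]
      simp only [hc]
    rw [hstep, machA]
    have hcs' : cs = (pre ++ [c]) ++ rest := by rw [hcs]; simp
    have := ih (pre ++ [c])
      (if (if c = '#' then true else b) = true ∧ c = '\n' ∧ ¬ (PySem.List.pyGetD cs ((pre.length : Int) - 1) ' ' = '\\') then false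
       else (if c = '#' then true else b))
      (if (if (if c = '#' then true else b) = true ∧ c = '\n' ∧ ¬ (PySem.List.pyGetD cs ((pre.length : Int) - 1) ' ' = '\\') then false
           else (if c = '#' then true else b)) = false then acc ++ [c] else acc)
      hcs'
    have hlen1 : (((pre ++ [c]).length : Nat) : Int) = (pre.length : Int) + 1 := by simp
    rw [hlen1] at this
    have hprev : PySem.List.pyGetD cs ((pre.length : Int) + 1 - 1) ' ' = c := by
      simpa using hc
    rw [hprev] at this
    rw [this]
    generalize (if (if c = '#' then true else b) = true ∧ c = '\n' ∧ ¬PySem.List.pyGetD cs ((pre.length : Int) - 1) ' ' = '\\' then false else if c = '#' then true else b) = B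
    cases B <;> simp

-- bridge: B's foldl + last step = runB
lemma runB_cons (b : Bool) (l l' : List Char) (ls : List (List Char)) :
    runB b (l :: l' :: ls) =
      (if b then [] else cutB l) ++ (if nextB b l then [] else ['\n']) ++ runB (nextB b l) (l' :: ls) := rfl

lemma foldB_eq : ∀ (ls : List (List Char)) (b : Bool) (out : List (List Char)) (last : List Char),
    (let st := List.foldl stepB (b, out) ls;
     (if st.1 = false then st.2 ++ [cutB last] else st.2).flatten) =
      out.flatten ++ runB b (ls ++ [last]) := by
  intro ls
  induction ls with
  | nil =>
    intro b out last
    cases b <;> simp [runB]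
  | cons l ls ih =>
    intro b out last
    rw [List.cons_append, List.foldl_cons]
    obtain ⟨m, ms, hm⟩ : ∃ m ms, ls ++ [last] = m :: ms := by
      cases ls with
      | nil => exact ⟨last, [], rfl⟩
      | cons a t => exact ⟨a, t ++ [last], rfl⟩
    rw [hm, runB_cons, ← hm]
    have hstep : stepB (b, out) l =
        (nextB b l, out ++ (if b then [] else [cutB l]) ++ (if nextB b l then [] else [['\n']])) := by
      cases b with
      | true =>
        rw [stepB, nextB]
        by_cases he : PySem.Chars.endswith l ['\\']
        · simp [he]
        · simp [he]
      | false =>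
        rw [stepB, nextB]
        by_cases hh : PySem.Chars.find l ['#'] = -1
        · simp [hh, cutB]
        · by_cases he : PySem.Chars.endswith l ['\\']
          · simp [hh, he, cutB]
          · simp [hh, he, cutB]
    rw [hstep, ih (nextB b l) _ last]
    set nb := nextB b l with hnbdef
    simp [List.flatten_append]
    rcases Bool.eq_false_or_eq_true nb with hnb | hnb <;>
      rcases Bool.eq_false_or_eq_true b with hb2 | hb2 <;> simp [hnb, hb2]

-- ===== VERDICT (by name: the statement is the Claim_ definition above) =====
theorem remove_macros_spec : Claim_equal_remove_macros := by
  intro string _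
  unfold Spec_remove_macros remove_macros remove_macros_alt
  dsimp only
  set cs := string.toList with hcs
  have hA : (List.foldl (stepA cs) (false, []) (PySem.List.pyRange 0 (PySem.List.len cs))).2
      = machA false (PySem.List.pyGetD cs ((0 : Int) - 1) ' ') cs := by
    have := foldA_eq cs cs [] false [] (by simp)
    simpa [PySem.List.len_eq] using this
  have hA2 : machA false (PySem.List.pyGetD cs ((0 : Int) - 1) ' ') cs
      = runB false (cs.splitOn '\n') :=
    machA_eq_runB cs.length cs false _ (le_refl _) (by intro h; cases h)
  have hlines : PySem.Chars.splitOn cs ['\n'] = cs.splitOn '\n' := splitOn_single _ _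
  have hne : cs.splitOn '\n' ≠ [] := by rw [List.splitOn]; exact List.splitOnP_ne_nil _ _
  have hB : PySem.Chars.join []
      (let st := List.foldl stepB (false, []) (PySem.List.slice (PySem.Chars.splitOn cs ['\n']) none (some (-1)));
       if st.1 = false then st.2 ++ [cutB (PySem.List.pyGetD (PySem.Chars.splitOn cs ['\n']) (-1) [])] else st.2)
      = runB false (cs.splitOn '\n') := by
    rw [hlines, slice_neg_one, PySem.List.pyGetD_neg_one _ _ hne, join_nil_flatten]
    rw [foldB_eq (cs.splitOn '\n').dropLast false [] ((cs.splitOn '\n').getLast hne)]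
    rw [List.dropLast_append_getLast hne]
    simp
  rw [hA, hA2, ← hB]
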